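-- pv_equiv track=rewrite | github.com/LaRenaiocco/job-practice | scrambies.py | scramble
-- ===== SOURCE A (Python) =====
-- def scramble(s1, s2):
--     dict1 = {}
--     for char in s1:
--         dict1[char] = dict1.get(char, 0) + 1
--     for char in s2:
--         value = dict1.get(char)
--         if value == None or value < 1:
--             return False
--         else:
--             dict1[char] = value - 1
--     return True
-- ===== SOURCE B (Python) =====
-- def scramble(s1, s2):
--     need = {}
--     for c in s2:
--         need[c] = need.get(c, 0) + 1
--     have = {}
--     for c in s1:
--         have[c] = have.get(c, 0) + 1
--     return all(n <= have.get(c, 0) for c, n in need.items())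
-- ===== Notes on version B (the rewrite author's own statement) =====
-- stated objective: idiomatic
-- what changed: B builds two frequency tables and compares them with a single all(...) over the demanded counts, replacing A's destructive decrement-and-early-return scan over s2.
import Mathlib
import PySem

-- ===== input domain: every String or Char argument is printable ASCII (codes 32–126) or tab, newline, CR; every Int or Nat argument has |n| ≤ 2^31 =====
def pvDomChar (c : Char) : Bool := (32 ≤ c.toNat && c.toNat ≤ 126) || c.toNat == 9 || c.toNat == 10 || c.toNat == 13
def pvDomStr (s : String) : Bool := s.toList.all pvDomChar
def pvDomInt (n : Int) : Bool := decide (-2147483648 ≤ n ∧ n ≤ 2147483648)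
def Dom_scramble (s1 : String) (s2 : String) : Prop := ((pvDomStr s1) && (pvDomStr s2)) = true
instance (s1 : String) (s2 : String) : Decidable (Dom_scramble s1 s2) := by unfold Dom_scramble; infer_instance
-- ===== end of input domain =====

-- B replaces A's destructive decrement-and-early-return scan with two frequency tables
-- compared by a single all(...) pass (idiomatic two-table comparison; same cost).


-- ===== PORT A =====
-- the 'for char in s2' loop: destructively decrements dict1, early-returns False
def scrambleLoop (xs : List Char) (d : PySem.Dict Char Int) : Bool :=
  match xs with
  | [] => true
  | c :: rest =>
    match d.get? c with
    | none => false                       -- value == None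
    | some v => if v < 1 then false else scrambleLoop rest (d.insert c (v - 1))

def scramble (s1 : String) (s2 : String) : Bool :=
  let dict1 := s1.toList.foldl (fun d c => d.insert c (d.getD c 0 + 1)) PySem.Dict.empty
  scrambleLoop s2.toList dict1

-- ===== PORT B =====
def scramble_alt (s1 : String) (s2 : String) : Bool :=
  let need := s2.toList.foldl (fun d c => d.insert c (d.getD c 0 + 1)) PySem.Dict.empty
  let hav := s1.toList.foldl (fun d c => d.insert c (d.getD c 0 + 1)) PySem.Dict.empty
  need.items.all (fun p : Char × Int => decide (p.2 ≤ hav.getD p.1 0))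

-- ===== PRECONDITION & SPEC =====
def Spec_scramble (s1 : String) (s2 : String) (out : Bool) : Prop := out = scramble_alt s1 s2
instance (s1 : String) (s2 : String) (out : Bool) : Decidable (Spec_scramble s1 s2 out) := by unfold Spec_scramble; infer_instance

-- ===== CLAIM (what is proved, stated in full; the proofs are below) =====
def Claim_equal_scramble : Prop := ∀ (s1 : String) (s2 : String), Dom_scramble s1 s2 → Spec_scramble s1 s2 (scramble s1 s2)

-- ===== LEMMAS AND PROOFS =====

-- A's decrement loop succeeds iff no char is demanded more often than d supplies
theorem scrambleLoop_eq_true_iff (xs : List Char) (d : PySem.Dict Char Int)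
    (hd : ∀ c, 0 ≤ d.getD c 0) :
    scrambleLoop xs d = true ↔ ∀ c, (xs.count c : Int) ≤ d.getD c 0 := by
  induction xs generalizing d with
  | nil => simpa [scrambleLoop] using hd
  | cons c rest ih =>
    cases hg : d.get? c with
    | none =>
      have hgd : d.getD c 0 = 0 := by rw [PySem.Dict.getD_eq_get?_getD, hg]; rfl
      simp only [scrambleLoop, hg, Bool.false_eq_true, false_iff]
      intro h
      have h1 := h c
      rw [hgd] at h1
      simp only [List.count_cons, BEq.rfl, if_pos] at h1
      push_cast at h1
      omega
    | some v =>
      have hgd : d.getD c 0 = v := by rw [PySem.Dict.getD_eq_get?_getD, hg]; rfl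
      by_cases hv : v < 1
      · simp only [scrambleLoop, hg, if_pos hv, Bool.false_eq_true, false_iff]
        intro h
        have h1 := h c
        rw [hgd] at h1
        simp only [List.count_cons, BEq.rfl, if_pos] at h1
        push_cast at h1
        omega
      · have hd' : ∀ c', 0 ≤ (d.insert c (v - 1)).getD c' 0 := by
          intro c'
          rw [PySem.Dict.getD_insert]
          by_cases hcc : c' = c
          · rw [if_pos hcc]; omega
          · rw [if_neg hcc]; exact hd c'
        simp only [scrambleLoop, hg, if_neg hv]
        rw [ih _ hd']
        constructor
        · intro h c'
          have h1 := h c'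
          rw [PySem.Dict.getD_insert] at h1
          simp only [List.count_cons]
          by_cases hcc : c' = c
          · rw [if_pos hcc] at h1
            subst hcc
            rw [hgd]
            simp only [BEq.rfl, if_pos]
            push_cast
            omega
          · rw [if_neg hcc] at h1
            rw [if_neg (by simpa using Ne.symm hcc)]
            push_cast
            omega
        · intro h c'
          have h1 := h c'
          rw [PySem.Dict.getD_insert]
          simp only [List.count_cons] at h1
          by_cases hcc : c' = c
          · rw [if_pos hcc]
            subst hcc
            rw [hgd] at h1
            simp only [BEq.rfl, if_pos] at h1
            push_cast at h1
            omega
          · rw [if_neg hcc]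
            rw [if_neg (by simpa using Ne.symm hcc)] at h1
            push_cast at h1
            omega

-- both programs decide the same multiset-inclusion statement
theorem both_iff (s1 s2 : String) :
    (scramble s1 s2 = true ↔ ∀ c, (s2.toList.count c : Int) ≤ (s1.toList.count c : Int))
    ∧ (scramble_alt s1 s2 = true ↔ ∀ c, (s2.toList.count c : Int) ≤ (s1.toList.count c : Int)) := by
  constructor
  · show scrambleLoop s2.toList (PySem.Dict.counter s1.toList) = true ↔ _
    rw [scrambleLoop_eq_true_iff _ _ (by intro c; rw [PySem.Dict.getD_counter]; positivity)]
    simp [PySem.Dict.getD_counter]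
  · show (PySem.Dict.counter s2.toList).items.all
        (fun p : Char × Int => decide (p.2 ≤ (PySem.Dict.counter s1.toList).getD p.1 0)) = true ↔ _
    rw [PySem.Dict.items_counter]
    simp only [List.all_eq_true, List.mem_map, decide_eq_true_eq, PySem.Dict.getD_counter]
    constructor
    · intro h c
      by_cases hc : c ∈ s2.toList
      · exact h (c, (s2.toList.count c : Int)) ⟨c, by simp_all, rfl⟩
      · rw [List.count_eq_zero.mpr hc]; positivity
    · rintro h p ⟨c, hc, rfl⟩
      exact h c

-- ===== VERDICT (by name: the statement is the Claim_ definition above) =====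
theorem scramble_spec : Claim_equal_scramble := by
  intro s1 s2 _
  unfold Spec_scramble
  obtain ⟨hA, hB⟩ := both_iff s1 s2
  rw [Bool.eq_iff_iff, hA, hB]
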